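-- pv_equiv track=rewrite | github.com/marczalik/discrete-math | base_expansion.py | expansion
-- ===== SOURCE A (Python) =====
-- def expansion(n, b):
--     """
--     n: a positive integer
--     b: an integer greater than 1
--
--     Returns a list of digits corresponding to the base b expansion of n
--     """
--
--     a = []
--     q = n
--
--     while q != 0:
--         a.append(q % b)
--         q = q // b
--
--     a.reverse()
--
--     return a
-- ===== SOURCE B (Python) =====
-- def expansion(n, b):
--     def quotients(q):
--         return [] if q == 0 else [q] + quotients(q // b)
--     return [q % b for q in reversed(quotients(n))]
-- ===== Notes on version B (the rewrite author's own statement) =====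
-- stated objective: alternative
-- what changed: Two-stage decomposition: recursively build the chain of successive quotients n, n//b, ... and then obtain the digits by mapping % b over the reversed chain, instead of A's while loop that accumulates remainders into a mutable list and reverses it in place.
import Mathlib
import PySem

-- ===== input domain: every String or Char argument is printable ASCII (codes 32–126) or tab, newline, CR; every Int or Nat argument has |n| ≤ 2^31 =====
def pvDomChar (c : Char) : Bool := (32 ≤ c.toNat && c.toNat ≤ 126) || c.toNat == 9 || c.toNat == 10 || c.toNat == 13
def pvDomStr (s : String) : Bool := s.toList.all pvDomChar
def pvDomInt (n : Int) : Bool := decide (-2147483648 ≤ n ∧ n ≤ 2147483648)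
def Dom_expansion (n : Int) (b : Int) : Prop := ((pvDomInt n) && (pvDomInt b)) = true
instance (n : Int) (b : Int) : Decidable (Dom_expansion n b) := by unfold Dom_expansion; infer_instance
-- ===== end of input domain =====

-- B restages the computation: it first builds the chain of successive quotients recursively,
-- then maps % b over the reversed chain — no digit accumulator, no in-place reverse
-- (objective: alternative decomposition, same cost).

-- ===== PORT A =====
-- A's while loop, with a fuel bound that merely makes it total: on every input admitted by
-- Pre_expansion ∩ Dom_expansion the loop runs far fewer than 200 iterations (≤ ~40), so the
-- fuel is never exhausted there and the port is exact.
def expLoopA (fuel : Nat) (q : Int) (b : Int) (a : List Int) : List Int :=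
  match fuel with
  | 0 => a
  | f + 1 =>
    if q ≠ 0 then
      expLoopA f (PySem.Int.floordiv q b) b (a ++ [PySem.Int.mod q b])
    else a

def expansion (n : Int) (b : Int) : List Int :=
  (expLoopA 200 n b []).reverse

-- ===== PORT B =====
-- Stage 1 of Source B: the quotient chain [n, n//b, (n//b)//b, …] down to (excluding) 0,
-- with the same totalising fuel bound (never exhausted inside Pre ∩ Dom).
def quotChain : Nat → Int → Int → List Int
  | 0, _, _ => []
  | f + 1, q, b => if q = 0 then [] else q :: quotChain f (PySem.Int.floordiv q b) b

-- Stage 2 of Source B: the comprehension [q % b for q in reversed(quotients(n))].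
def expansion_alt (n : Int) (b : Int) : List Int :=
  (quotChain 200 n b).reverse.map (fun q => PySem.Int.mod q b)

-- ===== PRECONDITION & SPEC =====
-- Exactly the inputs on which the Python A returns: n = 0 (loop body never runs, any b), or
-- n ≥ 0 with b ≥ 2 (the documented domain), or b ≤ -2 (negative-base expansion also reaches 0).
-- Elsewhere A raises ZeroDivisionError (b = 0, n ≠ 0) or loops forever (b ∈ {-1, 1} with n ≠ 0,
-- or n < 0 with b ≥ 2, where the quotient gets stuck at -1).
def Pre_expansion (n : Int) (b : Int) : Prop := n = 0 ∨ (0 ≤ n ∧ 2 ≤ b) ∨ b ≤ -2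
instance (n : Int) (b : Int) : Decidable (Pre_expansion n b) := by unfold Pre_expansion; infer_instance

def pvWitness_expansion : Int × Int := (100, 2)

def Spec_expansion (n : Int) (b : Int) (out : List Int) : Prop := out = expansion_alt n b
instance (n : Int) (b : Int) (out : List Int) : Decidable (Spec_expansion n b out) := by unfold Spec_expansion; infer_instance

-- ===== CLAIM (what is proved, stated in full; the proofs are below) =====
def Claim_equal_expansion : Prop := ∀ (n : Int) (b : Int), Dom_expansion n b → Pre_expansion n b → Spec_expansion n b (expansion n b)

-- ===== LEMMAS AND PROOFS =====

-- A's loop extends its accumulator with exactly the mods of B's quotient chain.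
theorem expLoopA_eq_map_quotChain (fuel : Nat) :
    ∀ (q b : Int) (a : List Int),
      expLoopA fuel q b a = a ++ (quotChain fuel q b).map (fun q => PySem.Int.mod q b) := by
  induction fuel with
  | zero => intro q b a; simp [expLoopA, quotChain]
  | succ f ih =>
    intro q b a
    by_cases hq : q = 0
    · simp [expLoopA, quotChain, hq]
    · simp [expLoopA, quotChain, hq, ih]

-- ===== VERDICT (by name: the statement is the Claim_ definition above) =====
theorem expansion_spec : Claim_equal_expansion := by
  intro n b _ _
  show expansion n b = expansion_alt n b
  simp [expansion, expansion_alt, expLoopA_eq_map_quotChain, List.map_reverse]
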